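-- pv_equiv track=rewrite | github.com/MatthewDaws/CodeJam | 2012_1a/c.py | add_index_to_assignments
-- ===== SOURCE A (Python) =====
-- class InvalidAssignment(Exception):
--     pass
--
-- def check_assignments(edges, assignment, index):
--     """Check if `assignment[index]` can be set consistently.
--     Returns a list of new indices which are added to assignment.
--     Throws InvalidAssignment if problem."""
--     otherside = { "L":"R", "R":"L" }
--     if index not in edges:
--         return []
--     changed = []
--     for nhb in edges[index]:
--         if nhb in assignment:
--             if assignment[nhb] != otherside[ assignment[index] ]:
--                 raise InvalidAssignment()
--         else:
--             assignment[nhb] = otherside[ assignment[index] ]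
--             changed.append(nhb)
--     return changed
--
-- def add_index_to_assignments(edges, assignment, index, what):
--     """Tries `assignment[index] = what` and changes all other assignments.
--     Returns new valid assignment, or empty dictionary."""
--     na = dict(assignment)
--     na[index] = what
--     todo = [ index ]
--     while len(todo) > 0:
--         index = todo.pop()
--         try:
--             todo.extend( check_assignments(edges, na, index) )
--         except InvalidAssignment:
--             return dict()
--     return na
-- ===== SOURCE B (Python) =====
-- # Recursive DFS instead of the explicit work-list: colours all neighbours of a vertex,
-- # then recurses into the newly coloured ones in stack order (reverse), so the resulting
-- # dict lists vertices in the same order as the iterative version.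
-- class _Conflict(Exception):
--     pass
--
-- def _propagate(edges, na, index):
--     other = "R" if na[index] == "L" else "L"
--     newly = []
--     for nhb in edges.get(index, []):
--         if nhb in na:
--             if na[nhb] != other:
--                 raise _Conflict()
--         else:
--             na[nhb] = other
--             newly.append(nhb)
--     for nhb in reversed(newly):
--         _propagate(edges, na, nhb)
--
-- def add_index_to_assignments(edges, assignment, index, what):
--     """Tries `assignment[index] = what` and changes all other assignments.
--     Returns new valid assignment, or empty dictionary."""
--     na = dict(assignment)
--     na[index] = what
--     try:
--         _propagate(edges, na, index)
--     except _Conflict: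
--         return dict()
--     return na
-- ===== Notes on version B (the rewrite author's own statement) =====
-- stated objective: alternative
-- what changed: The explicit todo work-list loop (pop, check_assignments returning a 'changed' list, extend) is replaced by a recursive DFS helper that colours a vertex's neighbours and recurses into the newly coloured ones, with the conflict check inlined; conflicts propagate as an exception caught at the top; Pre_ excludes only inputs where A raises KeyError (colour not 'L'/'R' on a vertex with neighbours).
import Mathlib
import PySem

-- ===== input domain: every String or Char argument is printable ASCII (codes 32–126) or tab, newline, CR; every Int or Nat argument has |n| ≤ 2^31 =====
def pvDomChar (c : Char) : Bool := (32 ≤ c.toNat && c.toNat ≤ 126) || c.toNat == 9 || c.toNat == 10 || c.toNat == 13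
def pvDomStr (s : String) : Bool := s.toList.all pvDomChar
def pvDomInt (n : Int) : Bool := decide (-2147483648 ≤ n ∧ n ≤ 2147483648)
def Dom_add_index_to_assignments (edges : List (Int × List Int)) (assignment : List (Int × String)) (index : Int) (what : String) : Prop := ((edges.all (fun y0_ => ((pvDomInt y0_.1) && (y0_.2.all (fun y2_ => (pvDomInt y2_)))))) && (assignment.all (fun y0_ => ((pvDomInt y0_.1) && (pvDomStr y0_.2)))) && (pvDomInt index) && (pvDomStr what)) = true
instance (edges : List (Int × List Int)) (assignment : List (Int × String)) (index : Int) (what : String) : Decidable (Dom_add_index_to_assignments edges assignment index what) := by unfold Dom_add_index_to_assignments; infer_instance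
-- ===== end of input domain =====

-- B replaces A's explicit work-list loop by a recursive DFS with the conflict check inlined
-- (children recursed in stack order, so the result dict is identical); same asymptotic cost.

-- ===== PORT A =====
-- fuel for the while-loop: every popped vertex is popped at most once (the initial index plus
-- vertices newly coloured, each appended once), so 1 + total neighbour occurrences bounds the pops
def pvFuel (edges : List (Int × List Int)) : Nat :=
  edges.foldl (fun s p => s + p.2.length) 0 + 1

-- otherside[c]; the KeyError case (c not "L"/"R", excluded by Pre_) is ported with default "L"
def pvOtherside (c : String) : String :=
  PySem.Dict.getD (PySem.Dict.mk [("L", "R"), ("R", "L")]) c "L"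

-- the for-loop of check_assignments, threading the mutated dict and the `changed` list
def pvCheckLoop (index : Int) : PySem.Dict Int String → List Int → List Int → Option (PySem.Dict Int String × List Int)
  | na, [], changed => some (na, changed)
  | na, nhb :: rest, changed =>
    let target := pvOtherside (PySem.Dict.getD na index "")
    match PySem.Dict.get? na nhb with
    | some v => if v ≠ target then none else pvCheckLoop index na rest changed
    | none => pvCheckLoop index (PySem.Dict.insert na nhb target) rest (changed ++ [nhb])

-- check_assignments; `none` = InvalidAssignment
def check_assignments (edges : PySem.Dict Int (List Int)) (na : PySem.Dict Int String) (index : Int) : Option (PySem.Dict Int String × List Int) :=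
  match PySem.Dict.get? edges index with
  | none => some (na, [])
  | some nbrs => pvCheckLoop index na nbrs []

-- the while-loop over the todo stack (pop = last element)
def pvLoopA (edges : PySem.Dict Int (List Int)) : Nat → PySem.Dict Int String → List Int → PySem.Dict Int String
  | 0, na, _ => na
  | fuel+1, na, todo =>
    match todo.getLast? with
    | none => na
    | some index =>
      match check_assignments edges na index with
      | none => PySem.Dict.mk []
      | some (na', changed) => pvLoopA edges fuel na' (todo.dropLast ++ changed)

def add_index_to_assignments (edges : List (Int × List Int)) (assignment : List (Int × String)) (index : Int) (what : String) : List (Int × String) :=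
  let ed := PySem.Dict.mk edges
  let na := PySem.Dict.insert (PySem.Dict.mk assignment) index what
  (pvLoopA ed (pvFuel edges) na [index]).items

-- ===== PORT B =====
-- the colouring for-loop of _propagate; `none` = _Conflict
def pvColorLoop (other : String) : PySem.Dict Int String → List Int → List Int → Option (PySem.Dict Int String × List Int)
  | na, [], newly => some (na, newly)
  | na, nhb :: rest, newly =>
    match PySem.Dict.get? na nhb with
    | some v => if v ≠ other then none else pvColorLoop other na rest newly
    | none => pvColorLoop other (PySem.Dict.insert na nhb other) rest (newly ++ [nhb])

-- _propagate; the recursion is made total by sequentially threaded fuel (returned leftover fuel,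
-- clamped by `min` only to exhibit termination); fuel is never exhausted for pvFuel edges
mutual
def pvPropagate (edges : PySem.Dict Int (List Int)) : Nat → PySem.Dict Int String → Int → Option (PySem.Dict Int String × Nat)
  | 0, na, _ => some (na, 0)
  | fuel+1, na, index =>
    let other := if PySem.Dict.getD na index "" == "L" then "R" else "L"
    match pvColorLoop other na (PySem.Dict.getD edges index []) [] with
    | none => none
    | some (na', newly) => pvPropList edges fuel na' newly.reverse
  termination_by fuel _ _ => (fuel, 0)

def pvPropList (edges : PySem.Dict Int (List Int)) : Nat → PySem.Dict Int String → List Int → Option (PySem.Dict Int String × Nat)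
  | fuel, na, [] => some (na, fuel)
  | fuel, na, n :: rest =>
    match pvPropagate edges fuel na n with
    | none => none
    | some (na', f') => pvPropList edges (min f' fuel) na' rest
  termination_by fuel _ pending => (fuel, pending.length + 1)
  decreasing_by
    · exact Prod.Lex.right _ (by simp)
    · rcases Nat.lt_or_ge (min f' fuel) fuel with h | h
      · exact Prod.Lex.left _ _ h
      · have hm : min f' fuel = fuel := Nat.le_antisymm (Nat.min_le_right _ _) h
        rw [hm]; exact Prod.Lex.right _ (by simp)
end

def add_index_to_assignments_alt (edges : List (Int × List Int)) (assignment : List (Int × String)) (index : Int) (what : String) : List (Int × String) :=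
  let ed := PySem.Dict.mk edges
  let na := PySem.Dict.insert (PySem.Dict.mk assignment) index what
  match pvPropagate ed (pvFuel edges) na index with
  | none => []
  | some (na', _) => na'.items

-- ===== PRECONDITION & SPEC =====
-- Pre_ excludes exactly the inputs on which A raises KeyError: `what` not "L"/"R" while `index`
-- has a (first-match) nonempty neighbour list in `edges`.
def Pre_add_index_to_assignments (edges : List (Int × List Int)) (assignment : List (Int × String)) (index : Int) (what : String) : Prop :=
  what = "L" ∨ what = "R" ∨ PySem.Dict.getD (PySem.Dict.mk edges) index [] = []
instance (edges : List (Int × List Int)) (assignment : List (Int × String)) (index : Int) (what : String) : Decidable (Pre_add_index_to_assignments edges assignment index what) := by unfold Pre_add_index_to_assignments; infer_instance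
def pvWitness_add_index_to_assignments : (List (Int × List Int)) × (List (Int × String)) × Int × String := ([(0, [1, 2]), (1, [0])], [(2, "L")], 0, "R")

def Spec_add_index_to_assignments (edges : List (Int × List Int)) (assignment : List (Int × String)) (index : Int) (what : String) (out : List (Int × String)) : Prop := out = add_index_to_assignments_alt edges assignment index what
instance (edges : List (Int × List Int)) (assignment : List (Int × String)) (index : Int) (what : String) (out : List (Int × String)) : Decidable (Spec_add_index_to_assignments edges assignment index what out) := by unfold Spec_add_index_to_assignments; infer_instance

-- ===== CLAIM (what is proved, stated in full; the proofs are below) =====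
def Claim_equal_add_index_to_assignments : Prop := ∀ (edges : List (Int × List Int)) (assignment : List (Int × String)) (index : Int) (what : String), Dom_add_index_to_assignments edges assignment index what → Pre_add_index_to_assignments edges assignment index what → Spec_add_index_to_assignments edges assignment index what (add_index_to_assignments edges assignment index what)

-- ===== LEMMAS AND PROOFS =====
theorem pvOtherside_eq (c : String) : pvOtherside c = (if c == "L" then "R" else "L") := by
  by_cases h : c = "L"
  · subst h; decide
  · by_cases h2 : c = "R"
    · subst h2; decide
    · have hL : ¬ ("L" = c) := fun e => h e.symm
      have hR : ¬ ("R" = c) := fun e => h2 e.symm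
      rw [pvOtherside, PySem.Dict.getD_eq_get?_getD, PySem.Dict.get?_mk_cons]
      simp [h, hL, hR, PySem.Dict.get?]

theorem pvCheckLoop_eq_colorLoop (index : Int) (c : String) :
    ∀ (nbrs : List Int) (na : PySem.Dict Int String) (changed : List Int),
    PySem.Dict.get? na index = some c →
    pvCheckLoop index na nbrs changed = pvColorLoop (pvOtherside c) na nbrs changed := by
  intro nbrs
  induction nbrs with
  | nil => intro na changed h; rfl
  | cons nhb rest ih =>
    intro na changed h
    have hD : PySem.Dict.getD na index "" = c := PySem.Dict.getD_of_get?_eq_some _ _ h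
    rw [pvCheckLoop, pvColorLoop]
    simp only [hD]
    cases hg : PySem.Dict.get? na nhb with
    | some v =>
      by_cases hv : v ≠ pvOtherside c
      · simp [hv]
      · simp [hv, ih na changed h]
    | none =>
      have hne : index ≠ nhb := by
        intro e; rw [e, hg] at h; simp at h
      have h' : PySem.Dict.get? (PySem.Dict.insert na nhb (pvOtherside c)) index = some c := by
        rw [PySem.Dict.get?_insert_of_ne _ _ hne, h]
      simp [ih _ _ h']

theorem pvColorLoop_keys (other : String) :
    ∀ (nbrs : List Int) (na : PySem.Dict Int String) (acc : List Int) (na' : PySem.Dict Int String) (ch : List Int),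
    pvColorLoop other na nbrs acc = some (na', ch) →
    (∀ x : Int, (PySem.Dict.get? na x).isSome → (PySem.Dict.get? na' x).isSome) ∧
    (∀ x ∈ ch, x ∈ acc ∨ (PySem.Dict.get? na' x).isSome) := by
  intro nbrs
  induction nbrs with
  | nil =>
    intro na acc na' ch h
    rw [pvColorLoop] at h
    simp only [Option.some.injEq, Prod.mk.injEq] at h
    obtain ⟨rfl, rfl⟩ := h
    exact ⟨fun x hx => hx, fun x hx => Or.inl hx⟩
  | cons nhb rest ih =>
    intro na acc na' ch h
    rw [pvColorLoop] at h
    cases hg : PySem.Dict.get? na nhb with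
    | some v =>
      rw [hg] at h
      by_cases hv : v ≠ other
      · simp [hv] at h
      · simp only [] at h
        rw [if_neg hv] at h
        exact ih na acc na' ch h
    | none =>
      rw [hg] at h
      simp only at h
      obtain ⟨m1, m2⟩ := ih _ _ _ _ h
      constructor
      · intro x hx
        apply m1
        by_cases hx2 : x = nhb
        · subst hx2; simp [PySem.Dict.get?_insert_self]
        · rwa [PySem.Dict.get?_insert_of_ne _ _ hx2]
      · intro x hx
        rcases m2 x hx with hm | hm
        · rcases List.mem_append.mp hm with hm2 | hm2
          · exact Or.inl hm2
          · right
            apply m1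
            have : x = nhb := by simpa using hm2
            subst this
            simp [PySem.Dict.get?_insert_self]
        · exact Or.inr hm

theorem pvPropList_fuel_le (edges : PySem.Dict Int (List Int)) :
    ∀ (xs : List Int) (fuel : Nat) (na na' : PySem.Dict Int String) (f' : Nat),
    pvPropList edges fuel na xs = some (na', f') → f' ≤ fuel := by
  intro xs
  induction xs with
  | nil =>
    intro fuel na na' f' h
    rw [pvPropList] at h
    simp only [Option.some.injEq, Prod.mk.injEq] at h
    omega
  | cons n rest ih =>
    intro fuel na na' f' h
    rw [pvPropList] at h
    cases hp : pvPropagate edges fuel na n with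
    | none => rw [hp] at h; simp at h
    | some p =>
      rw [hp] at h
      simp only [] at h
      have := ih (min p.2 fuel) p.1 na' f' h
      omega

theorem pvPropList_zero (edges : PySem.Dict Int (List Int)) :
    ∀ (xs : List Int) (na : PySem.Dict Int String),
    pvPropList edges 0 na xs = some (na, 0) := by
  intro xs
  induction xs with
  | nil => intro na; rw [pvPropList]
  | cons n rest ih =>
    intro na
    rw [pvPropList, pvPropagate]
    simp only [Nat.min_self]
    exact ih na

theorem pvPropList_append (edges : PySem.Dict Int (List Int)) :
    ∀ (xs : List Int) (fuel : Nat) (na : PySem.Dict Int String) (ys : List Int),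
    pvPropList edges fuel na (xs ++ ys) =
      (match pvPropList edges fuel na xs with
       | none => none
       | some (na', f') => pvPropList edges f' na' ys) := by
  intro xs
  induction xs with
  | nil =>
    intro fuel na ys
    simp only [List.nil_append]
    conv_rhs => rw [pvPropList]
  | cons n rest ih =>
    intro fuel na ys
    rw [List.cons_append, pvPropList]
    conv_rhs => rw [pvPropList]
    cases hp : pvPropagate edges fuel na n with
    | none => simp only
    | some p => simp only; rw [ih]

theorem pvMain (edges : PySem.Dict Int (List Int)) :
    ∀ (fuel : Nat) (na : PySem.Dict Int String) (todo : List Int),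
    (∀ x ∈ todo, (PySem.Dict.get? na x).isSome) →
    pvLoopA edges fuel na todo =
      (match pvPropList edges fuel na todo.reverse with
       | none => PySem.Dict.mk []
       | some (na', _) => na') := by
  intro fuel
  induction fuel with
  | zero =>
    intro na todo hinv
    rw [pvLoopA, pvPropList_zero]
  | succ fuel ih =>
    intro na todo hinv
    rw [pvLoopA]
    cases hL : todo.getLast? with
    | none =>
      have he : todo = [] := List.getLast?_eq_none_iff.mp hL
      subst he
      rw [List.reverse_nil, pvPropList]
    | some index =>
      obtain ⟨ys, rfl⟩ := List.getLast?_eq_some_iff.mp hL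
      have hmem : index ∈ ys ++ [index] := by simp
      obtain ⟨c, hc⟩ := Option.isSome_iff_exists.mp (hinv index hmem)
      have hD : PySem.Dict.getD na index "" = c := PySem.Dict.getD_of_get?_eq_some _ _ hc
      have hrev : (ys ++ [index]).reverse = index :: ys.reverse := by simp
      have hdrop : (ys ++ [index]).dropLast = ys := List.dropLast_concat
      rw [hdrop, hrev]
      conv_rhs => rw [pvPropList, pvPropagate]
      unfold check_assignments
      simp only [hD]
      have hinv' : ∀ x ∈ ys, (PySem.Dict.get? na x).isSome :=
        fun x hx => hinv x (List.mem_append.mpr (Or.inl hx))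
      cases hE : PySem.Dict.get? edges index with
      | none =>
        have hgD : PySem.Dict.getD edges index [] = [] := by
          rw [PySem.Dict.getD_eq_get?_getD, hE]; rfl
        rw [hgD, pvColorLoop]
        simp only [List.reverse_nil]
        rw [pvPropList]
        have hmin : min fuel (fuel + 1) = fuel := by omega
        simp only [hmin, List.append_nil]
        exact ih na ys hinv'
      | some nbrs =>
        have hgD : PySem.Dict.getD edges index [] = nbrs := PySem.Dict.getD_of_get?_eq_some _ _ hE
        rw [hgD]
        simp only []
        rw [pvCheckLoop_eq_colorLoop index c nbrs na [] hc, pvOtherside_eq c]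
        cases hCL : pvColorLoop (if c == "L" then "R" else "L") na nbrs [] with
        | none => rfl
        | some p =>
          obtain ⟨na₁, changed⟩ := p
          simp only []
          obtain ⟨hmono, hnew⟩ := pvColorLoop_keys _ _ _ _ _ _ hCL
          have hinv₁ : ∀ x ∈ ys ++ changed, (PySem.Dict.get? na₁ x).isSome := by
            intro x hx
            rcases List.mem_append.mp hx with hx | hx
            · exact hmono x (hinv' x hx)
            · rcases hnew x hx with hx2 | hx2
              · simp at hx2
              · exact hx2
          rw [ih na₁ (ys ++ changed) hinv₁, List.reverse_append, pvPropList_append]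
          cases hPL : pvPropList edges fuel na₁ changed.reverse with
          | none => rfl
          | some q =>
            obtain ⟨na₂, f₂⟩ := q
            have hle : f₂ ≤ fuel := pvPropList_fuel_le edges _ _ _ _ _ hPL
            have hmin : min f₂ (fuel + 1) = f₂ := by omega
            simp only [hmin]

-- ===== VERDICT (by name: the statement is the Claim_ definition above) =====
theorem add_index_to_assignments_spec : Claim_equal_add_index_to_assignments := by
  intro edges assignment index what _ _
  unfold Spec_add_index_to_assignments add_index_to_assignments add_index_to_assignments_alt
  simp only []
  have hinv : ∀ x ∈ [index], (PySem.Dict.get? (PySem.Dict.insert (PySem.Dict.mk assignment) index what) x).isSome := by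
    intro x hx
    simp only [List.mem_singleton] at hx
    subst hx
    rw [PySem.Dict.get?_insert_self]
    rfl
  have h := pvMain (PySem.Dict.mk edges) (pvFuel edges) (PySem.Dict.insert (PySem.Dict.mk assignment) index what) [index] hinv
  rw [show ([index].reverse) = [index] from rfl, pvPropList] at h
  cases hp : pvPropagate (PySem.Dict.mk edges) (pvFuel edges) (PySem.Dict.insert (PySem.Dict.mk assignment) index what) index with
  | none =>
    rw [hp] at h
    simp only [] at h
    rw [h]
  | some p =>
    rw [hp] at h
    simp only [] at h
    rw [pvPropList] at h
    simp only [] at h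
    rw [h]
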